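-- pv_equiv track=rewrite | github.com/zssasa/Bioinformatics | Bioinformatics6/week3/PartialSuffixArray.py | PartialSuffixArray
-- ===== SOURCE A (Python) =====
-- def PartialSuffixArray(text,k):
-- 	suffix = dict()
-- 	partial_suffix = dict()
-- 	for i in range(len(text)):
-- 		suffix[text[i:]+text[:i]] = i
-- 	sorted_suffix = sorted(suffix.items(),key=lambda x:x[0])
-- 	for i in range(len(sorted_suffix)):
-- 		if sorted_suffix[i][1]%k ==0 :
-- 			partial_suffix[i] = sorted_suffix[i][1]
-- 	return partial_suffix
-- ===== SOURCE B (Python) =====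
-- def PartialSuffixArray(text, k):
--     n = len(text)
--     s = text + text
--     rots = [s[i:i + n] for i in range(n)]
--
--     def ins(i, lst):
--         if not lst or rots[i] < rots[lst[0]]:
--             return [i] + lst
--         return [lst[0]] + ins(i, lst[1:])
--
--     order = []
--     for i in range(n):
--         order = ins(i, order)
--     return {r: i for r, i in enumerate(order) if i % k == 0}
-- ===== Notes on version B (the rewrite author's own statement) =====
-- stated objective: alternative
-- what changed: B drops A's rotation-keyed dict and built-in key-sort: it precomputes rotations as slices of the doubled string, sorts the rotation indices with a recursive insertion sort, and builds the result with one filtering enumerate comprehension. Pre_ excludes k=0 (both implementations raise ZeroDivisionError) and texts with duplicate cyclic rotations, on which A's dict overwrite keeps only the last index per duplicate rotation (an accidental dedup) while B ranks all indices.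
-- outside the precondition, e.g. on PartialSuffixArray('aa', 1): A returns {0: 1}, B returns {0: 0, 1: 1}
import Mathlib
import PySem

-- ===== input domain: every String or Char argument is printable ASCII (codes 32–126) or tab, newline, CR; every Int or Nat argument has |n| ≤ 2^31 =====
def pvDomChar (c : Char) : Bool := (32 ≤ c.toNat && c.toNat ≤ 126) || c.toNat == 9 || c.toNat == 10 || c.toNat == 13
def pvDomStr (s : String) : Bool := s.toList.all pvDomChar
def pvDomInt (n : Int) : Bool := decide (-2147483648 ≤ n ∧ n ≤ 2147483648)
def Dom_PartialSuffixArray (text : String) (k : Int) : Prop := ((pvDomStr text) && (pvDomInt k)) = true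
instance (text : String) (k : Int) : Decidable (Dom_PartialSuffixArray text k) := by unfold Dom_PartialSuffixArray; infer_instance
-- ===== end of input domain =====

-- B replaces A's rotation-keyed dict + built-in key-sort by an insertion sort of rotation
-- indices over the doubled string (alternative decomposition, similar cost).
-- String slicing/concatenation/comparison are ported on .toList (exact per PySem.Chars).

-- ===== PORT A =====
def PartialSuffixArray (text : String) (k : Int) : List (Int × Int) :=
  let cl := text.toList
  -- for i in range(len(text)): suffix[text[i:]+text[:i]] = i
  let suffix : PySem.Dict (List Char) Int :=
    (PySem.List.pyRange 0 (PySem.Str.len text)).foldl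
      (fun d i =>
        d.insert (PySem.List.slice cl (some i) none ++ PySem.List.slice cl none (some i)) i)
      PySem.Dict.empty
  -- sorted(suffix.items(), key=lambda x: x[0])
  let sorted_suffix := PySem.List.sorted suffix.items (fun x => x.1)
  -- for i in range(len(sorted_suffix)): if sorted_suffix[i][1] % k == 0: partial_suffix[i] = sorted_suffix[i][1]
  let partial_suffix : PySem.Dict Int Int :=
    (PySem.List.pyRange 0 (PySem.List.len sorted_suffix)).foldl
      (fun d i =>
        if PySem.Int.mod (PySem.List.pyGetD sorted_suffix i ([], 0)).2 k = 0 then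
          d.insert i (PySem.List.pyGetD sorted_suffix i ([], 0)).2
        else d)
      PySem.Dict.empty
  partial_suffix.items

-- ===== PORT B =====
-- def ins(i, lst): insert index i into the (sorted) list lst, comparing rotations
def pvInsB (rots : List (List Char)) (i : Int) : List Int → List Int
  | [] => [i]
  | j :: rest =>
      if PySem.List.pyGetD rots i [] < PySem.List.pyGetD rots j [] then i :: j :: rest
      else j :: pvInsB rots i rest

def PartialSuffixArray_alt (text : String) (k : Int) : List (Int × Int) :=
  let cl := text.toList
  let n : Int := (cl.length : Int)
  let s := cl ++ cl                                     -- s = text + text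
  -- rots = [s[i:i+n] for i in range(n)]
  let rots := (PySem.List.pyRange 0 n).map (fun i => PySem.List.slice s (some i) (some (i + n)))
  -- for i in range(n): order = ins(i, order)
  let order := (PySem.List.pyRange 0 n).foldl (fun lst i => pvInsB rots i lst) []
  -- {r: i for r, i in enumerate(order) if i % k == 0}
  ((PySem.List.enumerate order).foldl
      (fun d p => if PySem.Int.mod p.2 k = 0 then d.insert p.1 p.2 else d)
      PySem.Dict.empty).items

-- ===== PRECONDITION & SPEC =====
-- the i-th cyclic rotation of a character list (helper for Pre_ and the proofs)
def pvRot (cl : List Char) (i : Nat) : List Char := cl.drop i ++ cl.take i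

-- Pre_ excludes k = 0, where both programs raise ZeroDivisionError, and texts with duplicate
-- cyclic rotations (periodic texts), on which A's dict overwrite keeps only the last index per
-- duplicate rotation — an accidental dedup order — while B ranks all indices.
def Pre_PartialSuffixArray (text : String) (k : Int) : Prop :=
  k ≠ 0 ∧ ((List.range text.toList.length).map (pvRot text.toList)).Nodup
instance (text : String) (k : Int) : Decidable (Pre_PartialSuffixArray text k) := by
  unfold Pre_PartialSuffixArray; infer_instance

def pvWitness_PartialSuffixArray : String × Int := ("ab", 1)

def Spec_PartialSuffixArray (text : String) (k : Int) (out : List (Int × Int)) : Prop :=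
  out = PartialSuffixArray_alt text k
instance (text : String) (k : Int) (out : List (Int × Int)) : Decidable (Spec_PartialSuffixArray text k out) := by
  unfold Spec_PartialSuffixArray; infer_instance

-- ===== CLAIM (what is proved, stated in full; the proofs are below) =====
def Claim_equal_PartialSuffixArray : Prop :=
  ∀ (text : String) (k : Int), Dom_PartialSuffixArray text k →
    Pre_PartialSuffixArray text k →
    Spec_PartialSuffixArray text k (PartialSuffixArray text k)

-- ===== LEMMAS AND PROOFS =====

theorem pv_rot_take_drop (cl : List Char) (j : Nat) (hj : j ≤ cl.length) :
    List.take cl.length (List.drop j (cl ++ cl)) = pvRot cl j := by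
  rw [List.drop_append_of_le_length hj, pvRot]
  rw [List.take_append]
  have h1 : (cl.drop j).length = cl.length - j := List.length_drop
  rw [List.take_of_length_le (by omega)]
  congr 1
  congr 1
  omega

theorem pvInsB_perm (rots : List (List Char)) (i : Int) (lst : List Int) :
    (pvInsB rots i lst).Perm (i :: lst) := by
  induction lst with
  | nil => simp [pvInsB]
  | cons j rest ih =>
    rw [pvInsB]
    split
    · exact List.Perm.refl _
    · exact (ih.cons j).trans (List.Perm.swap i j rest)

theorem pvInsB_sorted (rots : List (List Char)) (i : Int) (lst : List Int)
    (hs : List.Pairwise (fun a b => PySem.List.pyGetD rots a [] < PySem.List.pyGetD rots b []) lst)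
    (hne : ∀ j ∈ lst, PySem.List.pyGetD rots i [] ≠ PySem.List.pyGetD rots j []) :
    List.Pairwise (fun a b => PySem.List.pyGetD rots a [] < PySem.List.pyGetD rots b [])
      (pvInsB rots i lst) := by
  induction lst with
  | nil => simp [pvInsB]
  | cons j rest ih =>
    rw [pvInsB]
    rcases List.pairwise_cons.mp hs with ⟨hj, hrest⟩
    split
    · rename_i hlt
      refine List.pairwise_cons.mpr ⟨?_, hs⟩
      intro b hb
      rcases List.mem_cons.mp hb with rfl | hb
      · exact hlt
      · exact lt_trans hlt (hj b hb)
    · rename_i hnlt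
      have hji : PySem.List.pyGetD rots j [] < PySem.List.pyGetD rots i [] := by
        rcases lt_or_eq_of_le (le_of_not_gt hnlt) with h | h
        · exact h
        · exact absurd h.symm (hne j (List.mem_cons_self))
      refine List.pairwise_cons.mpr ⟨?_, ih hrest (fun x hx => hne x (List.mem_cons_of_mem _ hx))⟩
      intro b hb
      rcases List.mem_cons.mp ((pvInsB_perm rots i rest).mem_iff.mp hb) with rfl | hb
      · exact hji
      · exact hj b hb

theorem pv_foldl_ins_perm (rots : List (List Char)) (l : List Int) (acc : List Int) :
    (l.foldl (fun lst i => pvInsB rots i lst) acc).Perm (acc ++ l) := by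
  induction l generalizing acc with
  | nil => simp
  | cons x t ih =>
    simp only [List.foldl_cons]
    refine (ih (pvInsB rots x acc)).trans ?_
    refine (List.Perm.append_right t (pvInsB_perm rots x acc)).trans ?_
    exact List.perm_middle.symm

theorem pv_foldl_ins_sorted (rots : List (List Char)) (l : List Int) (acc : List Int)
    (hs : List.Pairwise (fun a b => PySem.List.pyGetD rots a [] < PySem.List.pyGetD rots b []) acc)
    (hne : ∀ i ∈ l, ∀ x ∈ acc, PySem.List.pyGetD rots i [] ≠ PySem.List.pyGetD rots x [])
    (hnd : (l.map (fun i => PySem.List.pyGetD rots i [])).Nodup) :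
    List.Pairwise (fun a b => PySem.List.pyGetD rots a [] < PySem.List.pyGetD rots b [])
      (l.foldl (fun lst i => pvInsB rots i lst) acc) := by
  induction l generalizing acc with
  | nil => simpa using hs
  | cons x t ih =>
    simp only [List.map_cons, List.nodup_cons, List.mem_map] at hnd
    simp only [List.foldl_cons]
    refine ih (pvInsB rots x acc) (pvInsB_sorted rots x acc hs (fun j hj => hne x List.mem_cons_self j hj)) ?_ hnd.2
    intro i hi y hy
    rcases List.mem_cons.mp ((pvInsB_perm rots x acc).mem_iff.mp hy) with rfl | h
    · intro hc
      exact hnd.1 ⟨i, hi, hc⟩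
    · exact hne i (List.mem_cons_of_mem _ hi) y h

theorem pv_enumerate_eq {α : Type} (ys : List α) (d : α) (s : Int) :
    PySem.List.enumerate ys s = (List.range ys.length).map (fun (j : Nat) => (s + (j : Int), ys.getD j d)) := by
  induction ys generalizing s with
  | nil => simp [PySem.List.enumerate]
  | cons x t ih =>
    rw [PySem.List.enumerate, ih (s + 1)]
    rw [List.length_cons, List.range_succ_eq_map]
    simp only [List.map_cons, List.map_map]
    congr 1
    · simp
    · apply List.map_congr_left
      intro j hj
      simp only [Function.comp, Nat.succ_eq_add_one, List.getD_cons_succ, Prod.mk.injEq]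
      refine ⟨by push_cast; ring, trivial⟩

theorem pv_final_eq (order : List Int) (gf : Int → List Char) (k : Int) :
    ((PySem.List.pyRange 0 (PySem.List.len (order.map (fun i => (gf i, i))))).foldl
       (fun d i =>
         if PySem.Int.mod (PySem.List.pyGetD (order.map (fun i => (gf i, i))) i ([], 0)).2 k = 0 then
           d.insert i (PySem.List.pyGetD (order.map (fun i => (gf i, i))) i ([], 0)).2
         else d)
       PySem.Dict.empty).items
    = ((PySem.List.enumerate order).foldl
        (fun d p => if PySem.Int.mod p.2 k = 0 then d.insert p.1 p.2 else d)
        PySem.Dict.empty).items := by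
  set ss := order.map (fun i => (gf i, i)) with hss
  have hlen : ss.length = order.length := by simp [hss]
  have hlen' : PySem.List.len ss = (order.length : Int) := by
    simp [PySem.List.len, hlen]
  rw [hlen']
  simp only [PySem.List.foldl_ite_eq_foldl_filter]
  rw [PySem.List.pyRange_zero_natCast, pv_enumerate_eq order 0 0]
  rw [List.filter_map, List.filter_map]
  set fA : Nat → Int := fun j => (j : Int) with hfA
  set fB : Nat → Int × Int := fun j => ((0 : Int) + (j : Int), order.getD j 0) with hfB
  set pA := (fun x => decide (PySem.Int.mod (PySem.List.pyGetD ss x ([], 0)).2 k = 0)) ∘ fA with hpA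
  set pB := (fun (x : Int × Int) => decide (PySem.Int.mod x.2 k = 0)) ∘ fB with hpB
  have hnd1 : (((List.range order.length).filter pA).map fA).Nodup := by
    refine ((List.nodup_range).filter _ |>.map ?_)
    intro a b h
    simp only [hfA] at h
    exact_mod_cast h
  have hnd2 : ((((List.range order.length).filter pB).map fB).map (fun p => p.1)).Nodup := by
    rw [List.map_map]
    refine ((List.nodup_range).filter _ |>.map ?_)
    intro a b h
    simp only [Function.comp, hfB] at h
    omega
  rw [PySem.Dict.items_foldl_insert_fresh (((List.range order.length).filter pA).map fA)
        (fun i => i) (fun i => (PySem.List.pyGetD ss i ([], 0)).2) PySem.Dict.empty (by simp) (by simpa using hnd1)]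
  rw [PySem.Dict.items_foldl_insert_fresh ((((List.range order.length).filter pB).map fB))
        (fun p => p.1) (fun p => p.2) PySem.Dict.empty (by simp) hnd2]
  simp only [List.map_map]
  have hfil : ∀ (j : Nat), j ∈ List.range order.length → pA j = pB j := by
    intro j hj
    have hjlt : j < order.length := List.mem_range.mp hj
    simp only [hpA, hpB, hfA, hfB, Function.comp]
    congr 2
    rw [PySem.List.pyGetD_natCast, List.getD_eq_getElem ss _ (by omega)]
    rw [List.getD_eq_getElem order _ hjlt]
    simp [hss]
  rw [List.filter_congr hfil]
  apply List.map_congr_left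
  intro j hj
  have hjlt : j < order.length := List.mem_range.mp (List.mem_of_mem_filter hj)
  simp only [Function.comp, hfA, hfB]
  rw [PySem.List.pyGetD_natCast, List.getD_eq_getElem ss _ (by omega),
      List.getD_eq_getElem order _ hjlt]
  simp [hss]

theorem pv_main (text : String) (k : Int)
    (hnd : ((List.range text.toList.length).map (pvRot text.toList)).Nodup) :
    PartialSuffixArray text k = PartialSuffixArray_alt text k := by
  simp only [PartialSuffixArray, PartialSuffixArray_alt]
  set cl := text.toList with hcl
  set n := cl.length with hn
  set rots := (PySem.List.pyRange 0 (n : Int)).map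
      (fun i => PySem.List.slice (cl ++ cl) (some i) (some (i + (n : Int)))) with hrotsdef
  -- rots are the cyclic rotations
  have hrots : rots = (List.range n).map (pvRot cl) := by
    rw [hrotsdef, PySem.List.pyRange_zero_natCast, List.map_map]
    apply List.map_congr_left
    intro j hj
    have hjn : j < n := List.mem_range.mp hj
    simp only [Function.comp]
    have hcast : ((j : Int) + (n : Int)) = ((j + n : Nat) : Int) := by push_cast; ring
    rw [hcast, PySem.List.slice_natCast]
    have : j + n - j = n := by omega
    rw [this]
    exact pv_rot_take_drop cl j (by omega)
  have hg : ∀ j : Nat, j < n → PySem.List.pyGetD rots (j : Int) [] = pvRot cl j := by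
    intro j hj
    rw [hrots, PySem.List.pyGetD_natCast, List.getD_eq_getElem _ _ (by simpa using hj)]
    simp
  have hmapg : (PySem.List.pyRange 0 (n : Int)).map (fun i => PySem.List.pyGetD rots i [])
      = (List.range n).map (pvRot cl) := by
    rw [PySem.List.pyRange_zero_natCast, List.map_map]
    apply List.map_congr_left
    intro j hj
    exact hg j (List.mem_range.mp hj)
  set order := (PySem.List.pyRange 0 (n : Int)).foldl (fun lst i => pvInsB rots i lst) [] with horder
  have hperm : order.Perm (PySem.List.pyRange 0 (n : Int)) := by
    simpa using pv_foldl_ins_perm rots (PySem.List.pyRange 0 (n : Int)) []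
  have hsorted : List.Pairwise
      (fun a b => PySem.List.pyGetD rots a [] < PySem.List.pyGetD rots b []) order := by
    refine pv_foldl_ins_sorted rots _ [] (by simp) (by simp) ?_
    rw [hmapg]; exact hnd
  -- A's dict items
  have hitems : ((PySem.List.pyRange 0 (PySem.Str.len text)).foldl
      (fun d i =>
        d.insert (PySem.List.slice cl (some i) none ++ PySem.List.slice cl none (some i)) i)
      PySem.Dict.empty).items
      = (PySem.List.pyRange 0 (n : Int)).map (fun i => (PySem.List.pyGetD rots i [], i)) := by
    have hlen : PySem.Str.len text = (n : Int) := by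
      simp [PySem.Str.len_eq, hcl, hn]
    rw [hlen]
    have hkeys : ((PySem.List.pyRange 0 (n : Int)).map
        (fun i => PySem.List.slice cl (some i) none ++ PySem.List.slice cl none (some i))).Nodup := by
      rw [PySem.List.pyRange_zero_natCast, List.map_map]
      have : ((fun i => PySem.List.slice cl (some i) none ++ PySem.List.slice cl none (some i)) ∘
          (fun (j : Nat) => (j : Int))) = pvRot cl := by
        funext j
        simp only [Function.comp]
        rw [PySem.List.slice_from cl (by positivity), PySem.List.slice_to cl (by positivity)]
        simp [pvRot]
      rw [this]; exact hnd
    rw [PySem.Dict.items_foldl_insert_fresh _ _ (fun i => i) _ (by simp) hkeys]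
    have hemp : (PySem.Dict.empty : PySem.Dict (List Char) Int).items = [] := rfl
    rw [hemp, List.nil_append]
    rw [PySem.List.pyRange_zero_natCast, List.map_map, List.map_map]
    apply List.map_congr_left
    intro j hj
    have hjn : j < n := List.mem_range.mp hj
    simp only [Function.comp]
    rw [hg j hjn]
    congr 1
    rw [PySem.List.slice_from cl (by positivity), PySem.List.slice_to cl (by positivity)]
    simp [pvRot]
  -- A's sorted list is order, paired
  have hsortedA : PySem.List.sorted
      ((PySem.List.pyRange 0 (PySem.Str.len text)).foldl
        (fun d i =>
          d.insert (PySem.List.slice cl (some i) none ++ PySem.List.slice cl none (some i)) i)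
        PySem.Dict.empty).items (fun x => x.1)
      = order.map (fun i => (PySem.List.pyGetD rots i [], i)) := by
    have hp : (order.map (fun i => (PySem.List.pyGetD rots i [], i))).Perm
        ((PySem.List.pyRange 0 (PySem.Str.len text)).foldl
          (fun d i =>
            d.insert (PySem.List.slice cl (some i) none ++ PySem.List.slice cl none (some i)) i)
          PySem.Dict.empty).items := by
      rw [hitems]
      exact hperm.map _
    have hpw : List.Pairwise
        (fun (a b : List Char × Int) => a.1 < b.1)
        (order.map (fun i => (PySem.List.pyGetD rots i [], i))) := by
      rw [List.pairwise_map]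
      exact hsorted
    have hsortinst :
        @PySem.List.sorted (List Char × Int) (List Char) List.instLT (fun a b => a.decidableLT b)
          = @PySem.List.sorted (List Char × Int) (List Char) List.instLT
              (@LinearOrder.toDecidableLT (List Char) List.instLinearOrder) :=
      congrArg (fun d => @PySem.List.sorted (List Char × Int) (List Char) List.instLT d)
        (funext fun a => funext fun b => Subsingleton.elim _ _)
    rw [hsortinst]
    exact PySem.List.sorted_eq_of_perm_of_pairwise_lt _ _ (fun x => x.1) hp hpw
  rw [hsortedA]
  exact pv_final_eq order (fun i => PySem.List.pyGetD rots i []) k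


-- ===== VERDICT (by name: the statement is the Claim_ definition above) =====
theorem PartialSuffixArray_spec : Claim_equal_PartialSuffixArray := by
  intro text k _hdom hpre
  exact pv_main text k hpre.2
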